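-- pv_equiv track=rewrite | github.com/longcipher/auto-research | src/autoresearch/templates/__init__.py | _render_academic
-- ===== SOURCE A (Python) =====
-- import typing
--
-- _SUMMARY_MAX_CHARS = 120
--
-- def _render_academic(topic: str, readings: list[dict[str, typing.Any]]) -> str:
--     lines: list[str] = []
--     lines.append(f"# {topic}\n")
--     lines.append("## Executive Summary\n")
--     if readings:
--         lines.append(
--             f"This literature review synthesizes {len(readings)} sources "
--             f"related to **{topic}**. The review identifies key themes, "
--             "methodological approaches, and research gaps.\n"
--         )
--     else:
--         lines.append("No sources were collected for this report.\n")
--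
--     lines.append("## Key Findings\n")
--     if readings:
--         for i, r in enumerate(readings, 1):
--             title = str(r.get("title", "Untitled"))
--             content = str(r.get("content", ""))
--             lines.append(
--                 f"{i}. **{title}**: {content[:_SUMMARY_MAX_CHARS]}{'...' if len(content) > _SUMMARY_MAX_CHARS else ''}"
--             )
--         lines.append("")
--     else:
--         lines.append("No findings available.\n")
--
--     lines.append("## Detailed Analysis\n")
--     if readings:
--         for r in readings:
--             title = str(r.get("title", "Untitled"))
--             content = str(r.get("content", ""))
--             lines.append(f"### {title}\n")
--             lines.append(f"{content}\n")
--     else: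
--         lines.append("No data to analyze.\n")
--
--     lines.append("## Sources\n")
--     if readings:
--         for r in readings:
--             title = str(r.get("title", "Untitled"))
--             url = str(r.get("url", ""))
--             lines.append(f"- [{title}]({url})")
--         lines.append("")
--     else:
--         lines.append("No sources were collected.\n")
--
--     return "\n".join(lines)
-- ===== SOURCE B (Python) =====
-- import typing
--
-- _SUMMARY_MAX_CHARS = 120
--
--
-- def _render_academic(topic: str, readings: list[dict[str, typing.Any]]) -> str:
--     # One pass over readings filling three buffers, then section-by-section assembly.
--     findings: list[str] = []
--     analysis: list[str] = []
--     sources: list[str] = []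
--     for i, r in enumerate(readings, 1):
--         title = str(r.get("title", "Untitled"))
--         content = str(r.get("content", ""))
--         url = str(r.get("url", ""))
--         tail = "..." if len(content) > _SUMMARY_MAX_CHARS else ""
--         findings.append(f"{i}. **{title}**: {content[:_SUMMARY_MAX_CHARS]}{tail}")
--         analysis.extend([f"### {title}\n", f"{content}\n"])
--         sources.append(f"- [{title}]({url})")
--
--     lines = [f"# {topic}\n", "## Executive Summary\n"]
--     if readings:
--         lines.append(
--             f"This literature review synthesizes {len(readings)} sources "
--             f"related to **{topic}**. The review identifies key themes, "
--             "methodological approaches, and research gaps.\n"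
--         )
--         lines += ["## Key Findings\n"] + findings + [""]
--         lines += ["## Detailed Analysis\n"] + analysis
--         lines += ["## Sources\n"] + sources + [""]
--     else:
--         lines += ["No sources were collected for this report.\n",
--                   "## Key Findings\n", "No findings available.\n",
--                   "## Detailed Analysis\n", "No data to analyze.\n",
--                   "## Sources\n", "No sources were collected.\n"]
--     return "\n".join(lines)
-- ===== Notes on version B (the rewrite author's own statement) =====
-- stated objective: alternative
-- what changed: Replaces A's three separate guarded scans over readings (findings, analysis, sources) with a single pass that fills three buffers, followed by section-by-section assembly of the final lines list.
import Mathlib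
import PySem

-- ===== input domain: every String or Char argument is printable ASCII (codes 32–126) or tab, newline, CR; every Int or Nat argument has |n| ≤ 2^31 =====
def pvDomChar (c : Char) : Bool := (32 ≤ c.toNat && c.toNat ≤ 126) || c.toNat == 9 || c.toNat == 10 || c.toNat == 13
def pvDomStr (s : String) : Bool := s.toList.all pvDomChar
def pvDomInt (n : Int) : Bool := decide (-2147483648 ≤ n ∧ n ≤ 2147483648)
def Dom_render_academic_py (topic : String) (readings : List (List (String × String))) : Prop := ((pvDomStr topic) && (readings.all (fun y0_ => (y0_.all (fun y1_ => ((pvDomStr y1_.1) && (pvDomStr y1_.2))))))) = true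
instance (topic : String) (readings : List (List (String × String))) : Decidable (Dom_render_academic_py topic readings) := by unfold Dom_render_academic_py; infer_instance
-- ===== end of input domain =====

-- B replaces A's three guarded scans over `readings` by a single pass filling three
-- buffers (findings/analysis/sources) followed by section-by-section assembly (objective: alternative).

-- ===== PORT A =====
-- literal transliteration of _render_academic: one `lines` accumulator, three guarded loops
def render_academic_py (topic : String) (readings : List (List (String × String))) : String :=
  let lines : List String := []
  let lines := lines ++ ["# " ++ topic ++ "\n"]
  let lines := lines ++ ["## Executive Summary\n"]
  let lines :=
    if !readings.isEmpty then
      lines ++ ["This literature review synthesizes " ++ PySem.Int.toStr (readings.length : Int) ++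
        " sources related to **" ++ topic ++
        "**. The review identifies key themes, methodological approaches, and research gaps.\n"]
    else
      lines ++ ["No sources were collected for this report.\n"]
  let lines := lines ++ ["## Key Findings\n"]
  let lines :=
    if !readings.isEmpty then
      ((PySem.List.enumerate readings 1).foldl (fun acc ir =>
        let title := PySem.Dict.getD (PySem.Dict.mk ir.2) "title" "Untitled"
        let content := PySem.Dict.getD (PySem.Dict.mk ir.2) "content" ""
        acc ++ [PySem.Int.toStr ir.1 ++ ". **" ++ title ++ "**: " ++
          PySem.Str.slice content none (some 120) ++
          (if PySem.Str.len content > 120 then "..." else "")]) lines) ++ [""]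
    else
      lines ++ ["No findings available.\n"]
  let lines := lines ++ ["## Detailed Analysis\n"]
  let lines :=
    if !readings.isEmpty then
      readings.foldl (fun acc r =>
        let title := PySem.Dict.getD (PySem.Dict.mk r) "title" "Untitled"
        let content := PySem.Dict.getD (PySem.Dict.mk r) "content" ""
        acc ++ ["### " ++ title ++ "\n", content ++ "\n"]) lines
    else
      lines ++ ["No data to analyze.\n"]
  let lines := lines ++ ["## Sources\n"]
  let lines :=
    if !readings.isEmpty then
      (readings.foldl (fun acc r =>
        let title := PySem.Dict.getD (PySem.Dict.mk r) "title" "Untitled"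
        let url := PySem.Dict.getD (PySem.Dict.mk r) "url" ""
        acc ++ ["- [" ++ title ++ "](" ++ url ++ ")"]) lines) ++ [""]
    else
      lines ++ ["No sources were collected.\n"]
  PySem.Str.join "\n" lines

-- ===== PORT B =====
-- literal transliteration of Source B: one enumerate pass filling three buffers, then assembly
def render_academic_py_alt (topic : String) (readings : List (List (String × String))) : String :=
  let bufs : List String × List String × List String :=
    (PySem.List.enumerate readings 1).foldl (fun bufs ir =>
      let title := PySem.Dict.getD (PySem.Dict.mk ir.2) "title" "Untitled"
      let content := PySem.Dict.getD (PySem.Dict.mk ir.2) "content" ""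
      let url := PySem.Dict.getD (PySem.Dict.mk ir.2) "url" ""
      let tail := if PySem.Str.len content > 120 then "..." else ""
      (bufs.1 ++ [PySem.Int.toStr ir.1 ++ ". **" ++ title ++ "**: " ++
         PySem.Str.slice content none (some 120) ++ tail],
       bufs.2.1 ++ ["### " ++ title ++ "\n", content ++ "\n"],
       bufs.2.2 ++ ["- [" ++ title ++ "](" ++ url ++ ")"])) ([], [], [])
  let lines : List String := ["# " ++ topic ++ "\n", "## Executive Summary\n"]
  let lines :=
    if !readings.isEmpty then
      lines ++ ["This literature review synthesizes " ++ PySem.Int.toStr (readings.length : Int) ++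
          " sources related to **" ++ topic ++
          "**. The review identifies key themes, methodological approaches, and research gaps.\n"] ++
        (["## Key Findings\n"] ++ bufs.1 ++ [""]) ++
        (["## Detailed Analysis\n"] ++ bufs.2.1) ++
        (["## Sources\n"] ++ bufs.2.2 ++ [""])
    else
      lines ++ ["No sources were collected for this report.\n",
        "## Key Findings\n", "No findings available.\n",
        "## Detailed Analysis\n", "No data to analyze.\n",
        "## Sources\n", "No sources were collected.\n"]
  PySem.Str.join "\n" lines

-- ===== PRECONDITION & SPEC =====
def Spec_render_academic_py (topic : String) (readings : List (List (String × String))) (out : String) : Prop := out = render_academic_py_alt topic readings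
instance (topic : String) (readings : List (List (String × String))) (out : String) : Decidable (Spec_render_academic_py topic readings out) := by unfold Spec_render_academic_py; infer_instance

-- ===== CLAIM (what is proved, stated in full; the proofs are below) =====
def Claim_equal_render_academic_py : Prop := ∀ (topic : String) (readings : List (List (String × String))), Dom_render_academic_py topic readings → Spec_render_academic_py topic readings (render_academic_py topic readings)

-- ===== LEMMAS AND PROOFS =====

-- B's triple fold splits into three independent folds (a map and two flatMaps).
theorem triple_foldl_eq {α : Type} (F : Int × α → String) (G H : Int × α → List String)
    (l : List (Int × α)) (a b c : List String) :
    l.foldl (fun (bufs : List String × List String × List String) ir =>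
        (bufs.1 ++ [F ir], bufs.2.1 ++ G ir, bufs.2.2 ++ H ir)) (a, b, c)
      = (a ++ l.map F, b ++ l.flatMap G, c ++ l.flatMap H) := by
  induction l generalizing a b c with
  | nil => simp
  | cons x xs ih => simp [List.foldl_cons, ih]

-- the analysis lines ignore the enumerate index
theorem analysis_enum (xs : List (List (String × String))) (s : Int) :
    (PySem.List.enumerate xs s).flatMap (fun ir =>
        ["### " ++ PySem.Dict.getD (PySem.Dict.mk ir.2) "title" "Untitled" ++ "\n",
         PySem.Dict.getD (PySem.Dict.mk ir.2) "content" "" ++ "\n"])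
      = xs.flatMap (fun r =>
        ["### " ++ PySem.Dict.getD (PySem.Dict.mk r) "title" "Untitled" ++ "\n",
         PySem.Dict.getD (PySem.Dict.mk r) "content" "" ++ "\n"]) := by
  induction xs generalizing s with
  | nil => simp [PySem.List.enumerate_nil]
  | cons x xs ih => simp [PySem.List.enumerate_cons, ih]

-- the source lines ignore the enumerate index
theorem sources_enum (xs : List (List (String × String))) (s : Int) :
    (PySem.List.enumerate xs s).flatMap (fun ir =>
        ["- [" ++ PySem.Dict.getD (PySem.Dict.mk ir.2) "title" "Untitled" ++ "](" ++
         PySem.Dict.getD (PySem.Dict.mk ir.2) "url" "" ++ ")"])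
      = xs.map (fun r =>
        "- [" ++ PySem.Dict.getD (PySem.Dict.mk r) "title" "Untitled" ++ "](" ++
        PySem.Dict.getD (PySem.Dict.mk r) "url" "" ++ ")") := by
  induction xs generalizing s with
  | nil => simp [PySem.List.enumerate_nil]
  | cons x xs ih => simp [PySem.List.enumerate_cons, ih]

-- ===== VERDICT (by name: the statement is the Claim_ definition above) =====
theorem render_academic_py_spec : Claim_equal_render_academic_py := by
  intro topic readings _
  unfold Spec_render_academic_py render_academic_py render_academic_py_alt
  cases readings with
  | nil => simp
  | cons r rs =>
    simp only [List.isEmpty_cons, Bool.not_false, if_true, List.nil_append]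
    rw [triple_foldl_eq,
      PySem.List.foldl_append_singleton_eq_map
        (fun (ir : Int × List (String × String)) =>
          PySem.Int.toStr ir.1 ++ ". **" ++ PySem.Dict.getD (PySem.Dict.mk ir.2) "title" "Untitled" ++ "**: " ++
            PySem.Str.slice (PySem.Dict.getD (PySem.Dict.mk ir.2) "content" "") none (some 120) ++
            (if PySem.Str.len (PySem.Dict.getD (PySem.Dict.mk ir.2) "content" "") > 120 then "..." else "")),
      PySem.List.foldl_append_eq_flatMap
        (fun r => ["### " ++ PySem.Dict.getD (PySem.Dict.mk r) "title" "Untitled" ++ "\n",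
                   PySem.Dict.getD (PySem.Dict.mk r) "content" "" ++ "\n"]),
      PySem.List.foldl_append_singleton_eq_map
        (fun r => "- [" ++ PySem.Dict.getD (PySem.Dict.mk r) "title" "Untitled" ++ "](" ++
                  PySem.Dict.getD (PySem.Dict.mk r) "url" "" ++ ")"),
      analysis_enum, sources_enum]
    simp [List.append_assoc]
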